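-- pv_equiv track=rewrite | github.com/hzhou10cs/Chatbox_testbed | agents/generator.py | _validate_and_filter_deltas
-- ===== SOURCE A (Python) =====
-- from typing import Dict, List, Optional, Tuple, Union
--
-- ALLOWED_DOMAINS = {"activity", "nutrition", "sleep"}
--
-- ALLOWED_GOAL_KEYS = {"Specific", "Measurable", "Attainable", "Reward", "Timeframe"}
--
-- ALLOWED_LEAVES = {
--     "session": {"session_timestamp", "agenda"},
--     "activity": {"existing_plan", "progress", "barrier", "goal_set"},
--     "nutrition": {"existing_plan", "progress", "barrier", "goal_set"},
--     "sleep": {"existing_plan", "progress", "barrier", "goal_set"},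
-- }
--
-- def _validate_and_filter_deltas(raw_updates: List[Tuple[List[str], str]]) -> List[Tuple[List[str], str]]:
--     cleaned = []
--     for path, value in raw_updates:
--         if not path:
--             continue
--         root = path[0]
--         if root == "session":
--             if len(path) == 2 and path[1] in ALLOWED_LEAVES["session"]:
--                 cleaned.append((path, value))
--                 continue
--         if root in ALLOWED_DOMAINS:
--             if len(path) == 2 and path[1] in ALLOWED_LEAVES[root]:
--                 cleaned.append((path, value))
--                 continue
--             if len(path) == 3 and path[1] == "goal_set" and path[2] in ALLOWED_GOAL_KEYS:
--                 cleaned.append((path, value))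
--                 continue
--     return cleaned
-- ===== SOURCE B (Python) =====
-- ALLOWED_DOMAINS = {"activity", "nutrition", "sleep"}
-- ALLOWED_GOAL_KEYS = {"Specific", "Measurable", "Attainable", "Reward", "Timeframe"}
-- ALLOWED_LEAVES = {
--     "session": {"session_timestamp", "agenda"},
--     "activity": {"existing_plan", "progress", "barrier", "goal_set"},
--     "nutrition": {"existing_plan", "progress", "barrier", "goal_set"},
--     "sleep": {"existing_plan", "progress", "barrier", "goal_set"},
-- }
--
-- VALID_PATHS = frozenset(
--     [("session", leaf) for leaf in ALLOWED_LEAVES["session"]]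
--     + [(d, leaf) for d in ALLOWED_DOMAINS for leaf in ALLOWED_LEAVES[d]]
--     + [(d, "goal_set", k) for d in ALLOWED_DOMAINS for k in ALLOWED_GOAL_KEYS]
-- )
--
-- def _validate_and_filter_deltas(raw_updates):
--     return [(path, value) for path, value in raw_updates if tuple(path) in VALID_PATHS]
-- ===== Notes on version B (the rewrite author's own statement) =====
-- stated objective: simpler
-- what changed: Replaces the nested root/length/branch conditional cascade with one flat precomputed set of all valid path tuples and a single membership filter.
import Mathlib
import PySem

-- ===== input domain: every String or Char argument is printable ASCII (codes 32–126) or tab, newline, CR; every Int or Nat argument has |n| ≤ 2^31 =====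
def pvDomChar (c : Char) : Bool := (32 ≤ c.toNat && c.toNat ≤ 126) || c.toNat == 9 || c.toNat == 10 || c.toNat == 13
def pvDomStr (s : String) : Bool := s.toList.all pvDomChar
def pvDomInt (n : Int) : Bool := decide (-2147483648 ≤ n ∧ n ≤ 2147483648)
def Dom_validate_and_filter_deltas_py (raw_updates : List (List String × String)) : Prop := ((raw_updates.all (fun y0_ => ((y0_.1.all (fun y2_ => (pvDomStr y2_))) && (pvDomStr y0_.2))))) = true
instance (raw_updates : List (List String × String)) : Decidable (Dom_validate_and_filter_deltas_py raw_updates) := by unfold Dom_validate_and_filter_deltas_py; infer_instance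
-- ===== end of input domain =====

-- B replaces A's nested root/length/branch conditional cascade with one precomputed flat table of all valid paths and a single membership filter (objective: simpler).


-- ===== PORT A =====
def allowedDomainsA : List String := ["activity", "nutrition", "sleep"]
def allowedGoalKeysA : List String := ["Specific", "Measurable", "Attainable", "Reward", "Timeframe"]
-- ALLOWED_LEAVES[root] as a function (lookup in the literal dict)
def allowedLeavesA (root : String) : List String :=
  if root = "session" then ["session_timestamp", "agenda"]
  else ["existing_plan", "progress", "barrier", "goal_set"]

-- one iteration of A's loop body (the nested if/continue cascade)
def aStep (cleaned : List (List String × String)) (pv : List String × String) :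
    List (List String × String) :=
  let path := pv.1
  let value := pv.2
  if path = [] then cleaned
  else
    let root := path.headD ""
    if root = "session" ∧ path.length = 2 ∧ path.getD 1 "" ∈ allowedLeavesA "session" then
      cleaned ++ [(path, value)]
    else if root ∈ allowedDomainsA ∧ path.length = 2 ∧ path.getD 1 "" ∈ allowedLeavesA root then
      cleaned ++ [(path, value)]
    else if root ∈ allowedDomainsA ∧ path.length = 3 ∧ path.getD 1 "" = "goal_set" ∧
        path.getD 2 "" ∈ allowedGoalKeysA then
      cleaned ++ [(path, value)]
    else cleaned

def validate_and_filter_deltas_py (raw_updates : List (List String × String)) : List (List String × String) :=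
  raw_updates.foldl aStep []

-- ===== PORT B =====
-- the flat table VALID_PATHS of Source B (set of distinct path tuples)
def validPathsB : PySem.Set (List String) :=
  PySem.Set.ofList
    ((["session_timestamp", "agenda"].map (fun leaf => ["session", leaf]))
      ++ (["activity", "nutrition", "sleep"].flatMap (fun d =>
            ["existing_plan", "progress", "barrier", "goal_set"].map (fun leaf => [d, leaf])))
      ++ (["activity", "nutrition", "sleep"].flatMap (fun d =>
            ["Specific", "Measurable", "Attainable", "Reward", "Timeframe"].map
              (fun k => [d, "goal_set", k]))))

def validate_and_filter_deltas_py_alt (raw_updates : List (List String × String)) : List (List String × String) :=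
  raw_updates.filter (fun pv => pv.1 ∈ validPathsB)

-- ===== PRECONDITION & SPEC =====
def Spec_validate_and_filter_deltas_py (raw_updates : List (List String × String)) (out : List (List String × String)) : Prop := out = validate_and_filter_deltas_py_alt raw_updates
instance (raw_updates : List (List String × String)) (out : List (List String × String)) : Decidable (Spec_validate_and_filter_deltas_py raw_updates out) := by unfold Spec_validate_and_filter_deltas_py; infer_instance

-- ===== CLAIM (what is proved, stated in full; the proofs are below) =====
def Claim_equal_validate_and_filter_deltas_py : Prop := ∀ (raw_updates : List (List String × String)), Dom_validate_and_filter_deltas_py raw_updates → Spec_validate_and_filter_deltas_py raw_updates (validate_and_filter_deltas_py raw_updates)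

-- ===== LEMMAS AND PROOFS =====

-- per-element agreement: A's cascade accepts a path iff it is in B's flat table
theorem mem_validPathsB (p : List String) :
    p ∈ validPathsB ↔
      (∃ a ∈ ({"session_timestamp", "agenda"} : Set String), p = ["session", a]) ∨
      (∃ d ∈ ({"activity", "nutrition", "sleep"} : Set String),
        (∃ l ∈ ({"existing_plan", "progress", "barrier", "goal_set"} : Set String), p = [d, l]) ∨
        (∃ k ∈ ({"Specific", "Measurable", "Attainable", "Reward", "Timeframe"} : Set String),
          p = [d, "goal_set", k])) := by
  simp only [validPathsB, PySem.Set.mem_ofList, List.mem_append, List.mem_map,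
    List.mem_flatMap, List.mem_cons, List.not_mem_nil, or_false]
  aesop

theorem aStep_eq_filter_step (cleaned : List (List String × String)) (pv : List String × String) :
    aStep cleaned pv = if pv.1 ∈ validPathsB then cleaned ++ [pv] else cleaned := by
  obtain ⟨path, value⟩ := pv
  match path with
  | [] =>
    rw [if_neg]
    · rfl
    · simp [mem_validPathsB]
  | [a] =>
    rw [if_neg]
    · simp [aStep, allowedDomainsA, allowedLeavesA]
    · simp [mem_validPathsB]
  | [a, b] =>
    simp only [mem_validPathsB]
    simp only [aStep, allowedDomainsA, allowedLeavesA, allowedGoalKeysA]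
    by_cases ha : a = "session" <;> simp_all <;>
      first
        | decide
        | (simp_all [mem_validPathsB] <;> aesop)
  | [a, b, c] =>
    simp only [mem_validPathsB]
    simp only [aStep, allowedDomainsA, allowedLeavesA, allowedGoalKeysA]
    by_cases ha : a = "session" <;> simp_all <;>
      first
        | decide
        | (simp_all [mem_validPathsB] <;> aesop)
  | a :: b :: c :: d :: t =>
    rw [if_neg]
    · simp [aStep, allowedDomainsA, allowedLeavesA, allowedGoalKeysA]
    · simp [mem_validPathsB]

theorem foldl_aStep_eq (raw : List (List String × String)) (acc : List (List String × String)) :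
    raw.foldl aStep acc = acc ++ raw.filter (fun pv => pv.1 ∈ validPathsB) := by
  induction raw generalizing acc with
  | nil => simp
  | cons h t ih =>
    simp only [List.foldl_cons, List.filter_cons, aStep_eq_filter_step]
    split <;> simp_all

-- ===== VERDICT (by name: the statement is the Claim_ definition above) =====
theorem validate_and_filter_deltas_py_spec : Claim_equal_validate_and_filter_deltas_py := by
  intro raw _
  unfold Spec_validate_and_filter_deltas_py validate_and_filter_deltas_py validate_and_filter_deltas_py_alt
  simp [foldl_aStep_eq]
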